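-- pv_equiv track=rewrite | github.com/SiegeKeebsOffical/ComfyUI-Prompt-Extractor-Gallery | gallery_node.py | extract_positive_prompt
-- ===== SOURCE A (Python) =====
-- def extract_positive_prompt(parameters_text):
--     """
--     Extract only the positive prompt from A1111/Civitai parameters text.
--     Stops extraction when hitting any metadata phrase.
--     """
--     # Define the phrases that mark the end of the positive prompt
--     stop_phrases = [
--         "Negative prompt:",
--         "Steps:",
--         "Sampler:",
--         "CFG scale:",
--         "Seed:",
--         "Size:",
--         "Clip skip:",
--         "Created Date:",
--         "Civitai resources:",
--         "Civitai metadata:"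
--     ]
--
--     # Find the earliest occurrence of any stop phrase
--     earliest_index = len(parameters_text)
--     for phrase in stop_phrases:
--         index = parameters_text.find(phrase)
--         if index != -1 and index < earliest_index:
--             earliest_index = index
--
--     # Extract everything before the first stop phrase
--     prompt = parameters_text[:earliest_index].strip()
--     return prompt
-- ===== SOURCE B (Python) =====
-- STOP_PHRASES = (
--     "Negative prompt:",
--     "Steps:",
--     "Sampler:",
--     "CFG scale:",
--     "Seed:",
--     "Size:",
--     "Clip skip:",
--     "Created Date:",
--     "Civitai resources:",
--     "Civitai metadata:",
-- )
--
--
-- def extract_positive_prompt(parameters_text):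
--     """Single left-to-right scan: cut at the first position where any
--     stop phrase starts (str.startswith accepts the whole tuple at once)."""
--     for i in range(len(parameters_text)):
--         if parameters_text.startswith(STOP_PHRASES, i):
--             return parameters_text[:i].strip()
--     return parameters_text.strip()
-- ===== Notes on version B (the rewrite author's own statement) =====
-- stated objective: idiomatic
-- what changed: One left-to-right scan that stops at the first position where any stop phrase starts (str.startswith with a tuple), instead of ten separate str.find passes whose minimum index is tracked.
import Mathlib
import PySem

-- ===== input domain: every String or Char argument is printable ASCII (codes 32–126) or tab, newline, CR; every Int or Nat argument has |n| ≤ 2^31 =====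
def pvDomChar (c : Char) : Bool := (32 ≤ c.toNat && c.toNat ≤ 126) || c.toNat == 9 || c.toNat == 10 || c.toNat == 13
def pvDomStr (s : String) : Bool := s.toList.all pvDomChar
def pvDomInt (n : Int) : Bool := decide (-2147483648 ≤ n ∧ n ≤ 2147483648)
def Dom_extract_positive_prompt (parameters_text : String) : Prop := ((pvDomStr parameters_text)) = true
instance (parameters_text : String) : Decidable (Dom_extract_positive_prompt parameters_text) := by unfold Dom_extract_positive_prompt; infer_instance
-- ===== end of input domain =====

-- B replaces A's ten str.find passes (minimum index tracked) by one left-to-right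
-- scan that cuts at the first position where any stop phrase starts (idiomatic; not faster).


-- ===== PORT A =====
-- the stop_phrases list of A (B scans for the same ten literals)
def pvStopPhrases : List String :=
  ["Negative prompt:", "Steps:", "Sampler:", "CFG scale:", "Seed:", "Size:",
   "Clip skip:", "Created Date:", "Civitai resources:", "Civitai metadata:"]

-- one iteration of A's loop: keep the smaller found index
def pvStepA (s : String) (e : Int) (phrase : String) : Int :=
  let index := PySem.Str.find s phrase
  if index ≠ -1 ∧ index < e then index else e

def extract_positive_prompt (parameters_text : String) : String :=
  let earliest_index := pvStopPhrases.foldl (pvStepA parameters_text) (PySem.Str.len parameters_text)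
  PySem.Str.strip (PySem.Str.slice parameters_text none (some earliest_index))

-- ===== PORT B =====
-- does any stop phrase start right here? (str.startswith with the whole tuple)
def pvHit (t : List Char) : Bool :=
  pvStopPhrases.any (fun p => PySem.Chars.startswith t p.toList)

-- B's loop over i in range(len(text)): the first position where a stop phrase starts
-- (falls through to the length when no position hits, i.e. the final `return text.strip()`)
def pvFirstStop : List Char → Nat
  | [] => 0
  | c :: rest => if pvHit (c :: rest) then 0 else pvFirstStop rest + 1

def extract_positive_prompt_alt (parameters_text : String) : String :=
  PySem.Str.strip
    (PySem.Str.slice parameters_text none (some (pvFirstStop parameters_text.toList : Int)))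

-- ===== PRECONDITION & SPEC =====
def Spec_extract_positive_prompt (parameters_text : String) (out : String) : Prop := out = extract_positive_prompt_alt parameters_text
instance (parameters_text : String) (out : String) : Decidable (Spec_extract_positive_prompt parameters_text out) := by unfold Spec_extract_positive_prompt; infer_instance

-- ===== CLAIM (what is proved, stated in full; the proofs are below) =====
def Claim_equal_extract_positive_prompt : Prop := ∀ (parameters_text : String), Dom_extract_positive_prompt parameters_text → Spec_extract_positive_prompt parameters_text (extract_positive_prompt parameters_text)

-- ===== LEMMAS AND PROOFS =====

-- a position hits iff some stop phrase is a prefix of the suffix there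
theorem pvHit_iff (t : List Char) :
    pvHit t = true ↔ ∃ p ∈ pvStopPhrases, p.toList <+: t := by
  simp [pvHit, List.any_eq_true, PySem.Chars.startswith_iff]

theorem pvFirstStop_le (t : List Char) : pvFirstStop t ≤ t.length := by
  induction t with
  | nil => simp [pvFirstStop]
  | cons c rest ih => simp only [pvFirstStop]; split_ifs <;> simp only [List.length_cons] <;> omega

theorem pvFirstStop_not_hit (t : List Char) :
    ∀ j, j < pvFirstStop t → pvHit (t.drop j) = false := by
  induction t with
  | nil => simp [pvFirstStop]
  | cons c rest ih =>
    intro j hj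
    simp only [pvFirstStop] at hj
    split_ifs at hj with h
    · omega
    · cases j with
      | zero => simpa using Bool.eq_false_iff.mpr h
      | succ k => exact ih k (by omega)

theorem pvFirstStop_hit (t : List Char) (h : pvFirstStop t < t.length) :
    pvHit (t.drop (pvFirstStop t)) = true := by
  induction t with
  | nil => simp at h
  | cons c rest ih =>
    simp only [pvFirstStop] at h ⊢
    by_cases hh : pvHit (c :: rest) = true
    · simp [hh]
    · rw [if_neg hh] at h ⊢
      simp only [List.drop_succ_cons, List.length_cons] at h ⊢
      exact ih (by omega)

-- A's fold invariant: the result is nonnegative, ≤ the start value, equal to some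
-- phrase's find index when it dropped, and ≤ every found index
theorem pvFoldA_spec (s : String) (ps : List String) :
    ∀ e : Int, 0 ≤ e →
      0 ≤ ps.foldl (pvStepA s) e ∧
      ps.foldl (pvStepA s) e ≤ e ∧
      (ps.foldl (pvStepA s) e < e → ∃ p ∈ ps, PySem.Str.find s p = ps.foldl (pvStepA s) e) ∧
      (∀ p ∈ ps, PySem.Str.find s p ≠ -1 → ps.foldl (pvStepA s) e ≤ PySem.Str.find s p) := by
  induction ps with
  | nil => intro e he; simp [he]
  | cons q qs ih =>
    intro e he
    have hq1 : -1 ≤ PySem.Str.find s q := by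
      simpa using PySem.Chars.neg_one_le_find s.toList q.toList
    simp only [List.foldl_cons]
    by_cases hc : PySem.Str.find s q ≠ -1 ∧ PySem.Str.find s q < e
    · have hstep : pvStepA s e q = PySem.Str.find s q := by simp only [pvStepA]; rw [if_pos hc]
      rw [hstep]
      have he' : 0 ≤ PySem.Str.find s q := by
        rcases hc with ⟨h1, _⟩; omega
      obtain ⟨a1, a2, a3, a4⟩ := ih (PySem.Str.find s q) he'
      refine ⟨a1, by omega, ?_, ?_⟩
      · intro hlt
        by_cases hlt2 : qs.foldl (pvStepA s) (PySem.Str.find s q) < PySem.Str.find s q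
        · obtain ⟨p, hp, hfp⟩ := a3 hlt2
          exact ⟨p, by simp [hp], hfp⟩
        · exact ⟨q, by simp, by omega⟩
      · intro p hp hne
        rcases List.mem_cons.mp hp with rfl | hp'
        · omega
        · exact a4 p hp' hne
    · have hstep : pvStepA s e q = e := by simp only [pvStepA]; rw [if_neg hc]
      rw [hstep]
      obtain ⟨a1, a2, a3, a4⟩ := ih e he
      refine ⟨a1, a2, ?_, ?_⟩
      · intro hlt
        obtain ⟨p, hp, hfp⟩ := a3 hlt
        exact ⟨p, by simp [hp], hfp⟩
      · intro p hp hne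
        rcases List.mem_cons.mp hp with rfl | hp'
        · rw [not_and, not_lt] at hc
          have := hc hne
          omega
        · exact a4 p hp' hne

-- the bridge: A's minimum-of-finds equals B's first-hit scan index
theorem pvFold_eq_firstStop (s : String) :
    pvStopPhrases.foldl (pvStepA s) (PySem.Str.len s) = (pvFirstStop s.toList : Int) := by
  have hn : PySem.Str.len s = (s.toList.length : Int) := by simp
  obtain ⟨a1, a2, a3, a4⟩ :=
    pvFoldA_spec s pvStopPhrases (PySem.Str.len s) (by rw [hn]; positivity)
  set t := s.toList with ht
  set E := pvStopPhrases.foldl (pvStepA s) (PySem.Str.len s) with hE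
  set K := pvFirstStop t with hK
  have hnohit : ∀ j : Nat, (j : Int) < E → pvHit (t.drop j) = false := by
    intro j hj
    rw [Bool.eq_false_iff]
    intro hht
    obtain ⟨p, hp, hpre⟩ := (pvHit_iff _).mp hht
    by_cases hf : PySem.Str.find s p = -1
    · have hni : ¬ p.toList <:+: t := by
        have := (PySem.Str.find_eq_neg_one_iff (s := s) (sub := p)).mp hf
        simpa [ht] using this
      have hisin : PySem.Chars.isIn p.toList t = false :=
        (PySem.Chars.isIn_eq_false_iff _ _).mpr hni
      have hex : (∃ j, p.toList <+: t.drop j) := ⟨j, hpre⟩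
      rw [PySem.Chars.exists_prefix_drop_iff_isIn] at hex
      rw [hisin] at hex
      exact Bool.false_ne_true hex
    · have hle := a4 p hp hf
      have hfe : PySem.Str.find s p = PySem.Chars.find t p.toList := by simp [ht]
      have hpos : 0 ≤ PySem.Chars.find t p.toList := by
        have := PySem.Chars.neg_one_le_find t p.toList
        rw [hfe] at hf; omega
      have hspec := PySem.Chars.find_spec (s := t) (sub := p.toList) hpos
      refine hspec.2 j ?_ hpre
      rw [hfe] at hle
      omega
  have hKle := pvFirstStop_le t
  have hEn : E ≤ (t.length : Int) := a2
  have heq : E.toNat = K := by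
    rcases lt_trichotomy E.toNat K with hlt | heq | hgt
    · exfalso
      have hElt : E < (t.length : Int) := by omega
      obtain ⟨p, hp, hfp⟩ := a3 (by rw [hn]; exact hElt)
      have hfe : PySem.Str.find s p = PySem.Chars.find t p.toList := by simp [ht]
      rw [hfe] at hfp
      have hpos : 0 ≤ PySem.Chars.find t p.toList := by omega
      have hspec := PySem.Chars.find_spec (s := t) (sub := p.toList) hpos
      have hhit : pvHit (t.drop E.toNat) = true := by
        rw [pvHit_iff]
        refine ⟨p, hp, ?_⟩
        have : (PySem.Chars.find t p.toList).toNat = E.toNat := by rw [hfp]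
        rw [← this]; exact hspec.1
      rw [pvFirstStop_not_hit t E.toNat hlt] at hhit
      exact Bool.false_ne_true hhit
    · exact heq
    · exfalso
      have hKlt : K < t.length := by omega
      have hhit := pvFirstStop_hit t hKlt
      rw [hnohit K (by omega)] at hhit
      exact Bool.false_ne_true hhit
  omega

-- ===== VERDICT (by name: the statement is the Claim_ definition above) =====
theorem extract_positive_prompt_spec : Claim_equal_extract_positive_prompt := by
  intro s _
  unfold Spec_extract_positive_prompt extract_positive_prompt extract_positive_prompt_alt
  rw [pvFold_eq_firstStop]
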